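-- pv_equiv track=rewrite | github.com/MrBrantCode/unitest_baseline | mut_generate/mist_train_cf/cf_90229/solution.py | second_smallest_odd_index
-- ===== SOURCE A (Python) =====
-- def second_smallest_odd_index(lst):
--     smallest_odd = float('inf')
--     second_smallest_odd = float('inf')
--     smallest_odd_index = -1
--     second_smallest_odd_index = -1
--
--     for i, num in enumerate(lst):
--         if num % 2 != 0:  # check if odd
--             if num < smallest_odd:
--                 second_smallest_odd = smallest_odd
--                 second_smallest_odd_index = smallest_odd_index
--                 smallest_odd = num
--                 smallest_odd_index = i
--             elif num < second_smallest_odd: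
--                 second_smallest_odd = num
--                 second_smallest_odd_index = i
--
--     if second_smallest_odd_index == -1:
--         return -1
--     else:
--         return second_smallest_odd_index
-- ===== SOURCE B (Python) =====
-- def second_smallest_odd_index(lst):
--     odds = [(num, i) for i, num in enumerate(lst) if num % 2 != 0]
--     odds.sort(key=lambda p: p[0])  # stable: ties keep original index order
--     return odds[1][1] if len(odds) >= 2 else -1
-- ===== Notes on version B (the rewrite author's own statement) =====
-- stated objective: simpler
-- what changed: Replaces the running two-minima scan with its sentinel/shift bookkeeping by a three-line build-filter, stable sort by value, and index into the sorted pairs.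
import Mathlib
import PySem

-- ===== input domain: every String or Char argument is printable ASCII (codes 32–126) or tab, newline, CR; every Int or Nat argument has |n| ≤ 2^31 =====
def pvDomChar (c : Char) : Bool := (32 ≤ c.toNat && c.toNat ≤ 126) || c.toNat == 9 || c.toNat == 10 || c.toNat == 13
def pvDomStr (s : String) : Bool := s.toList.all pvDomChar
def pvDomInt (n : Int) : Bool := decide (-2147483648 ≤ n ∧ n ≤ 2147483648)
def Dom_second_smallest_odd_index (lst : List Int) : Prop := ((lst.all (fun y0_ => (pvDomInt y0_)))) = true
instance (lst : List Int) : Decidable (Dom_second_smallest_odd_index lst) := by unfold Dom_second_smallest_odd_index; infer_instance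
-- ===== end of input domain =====

-- B replaces A's running two-minima scan by collect-odds / stable-sort-by-value / take second index: simpler, same result.

-- ===== PORT A =====
-- float('inf') sentinel ported as Option Int (none = +inf): 'num < inf' is true for every int.
def pvLtInf (num : Int) (o : Option Int) : Bool :=
  match o with
  | none => true
  | some v => decide (num < v)

def second_smallest_odd_index (lst : List Int) : Int :=
  -- state = (smallest_odd, smallest_odd_index, second_smallest_odd, second_smallest_odd_index)
  let st := (PySem.List.enumerate lst).foldl
    (fun (st : Option Int × Int × Option Int × Int) p =>
      if PySem.Int.mod p.2 2 ≠ 0 then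
        if pvLtInf p.2 st.1 then (some p.2, p.1, st.1, st.2.1)
        else if pvLtInf p.2 st.2.2.1 then (st.1, st.2.1, some p.2, p.1)
        else st
      else st)
    (none, -1, none, -1)
  if st.2.2.2 = -1 then -1 else st.2.2.2

-- ===== PORT B =====
def second_smallest_odd_index_alt (lst : List Int) : Int :=
  let odds := ((PySem.List.enumerate lst).filter
      (fun p => PySem.Int.mod p.2 2 ≠ 0)).map (fun p => (p.2, p.1))
  match PySem.List.sorted odds (fun p => p.1) with
  | _ :: (_, i) :: _ => i
  | _ => -1

-- ===== PRECONDITION & SPEC =====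
def Spec_second_smallest_odd_index (lst : List Int) (out : Int) : Prop := out = second_smallest_odd_index_alt lst
instance (lst : List Int) (out : Int) : Decidable (Spec_second_smallest_odd_index lst out) := by unfold Spec_second_smallest_odd_index; infer_instance

-- ===== CLAIM (what is proved, stated in full; the proofs are below) =====
def Claim_equal_second_smallest_odd_index : Prop := ∀ (lst : List Int), Dom_second_smallest_odd_index lst → Spec_second_smallest_odd_index lst (second_smallest_odd_index lst)

-- ===== LEMMAS AND PROOFS =====

-- A's loop body on an odd pair (value, index)
def pvAStep (st : Option Int × Int × Option Int × Int) (q : Int × Int) :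
    Option Int × Int × Option Int × Int :=
  if pvLtInf q.1 st.1 then (some q.1, q.2, st.1, st.2.1)
  else if pvLtInf q.1 st.2.2.1 then (st.1, st.2.1, some q.1, q.2)
  else st

-- the first two elements of a pair list, in A's state format
def pvTop2 : List (Int × Int) → Option Int × Int × Option Int × Int
  | [] => (none, -1, none, -1)
  | [(v, i)] => (some v, i, none, -1)
  | (v, i) :: (w, j) :: _ => (some v, i, some w, j)

lemma pvStep_insertBy (acc : List (Int × Int)) (q : Int × Int) :
    pvAStep (pvTop2 acc) q =
      pvTop2 (PySem.List.insertBy (fun a b => decide (a.1 < b.1)) q acc) := by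
  obtain ⟨v, i⟩ := q
  match acc with
  | [] => simp [pvAStep, pvTop2, PySem.List.insertBy, pvLtInf]
  | [(a, ai)] =>
      by_cases h : v < a
      · simp [pvAStep, pvTop2, PySem.List.insertBy, pvLtInf, h]
      · simp [pvAStep, pvTop2, PySem.List.insertBy, pvLtInf, h]
  | (a, ai) :: (b, bi) :: t =>
      by_cases h1 : v < a
      · simp [pvAStep, pvTop2, PySem.List.insertBy, pvLtInf, h1]
      · by_cases h2 : v < b
        · simp [pvAStep, pvTop2, PySem.List.insertBy, pvLtInf, h1, h2]
        · simp [pvAStep, pvTop2, PySem.List.insertBy, pvLtInf, h1, h2]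

lemma pvFold_insertBy (ps : List (Int × Int)) (acc : List (Int × Int)) :
    ps.foldl pvAStep (pvTop2 acc) =
      pvTop2 (ps.foldl (fun a q => PySem.List.insertBy (fun a b => decide (a.1 < b.1)) q a) acc) := by
  induction ps generalizing acc with
  | nil => rfl
  | cons q ps ih => simpa [pvStep_insertBy] using ih (PySem.List.insertBy (fun a b => decide (a.1 < b.1)) q acc)

lemma pvFilter_fold (l : List (Int × Int)) (st : Option Int × Int × Option Int × Int) :
    l.foldl
      (fun st p =>
        if PySem.Int.mod p.2 2 ≠ 0 then
          if pvLtInf p.2 st.1 then (some p.2, p.1, st.1, st.2.1)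
          else if pvLtInf p.2 st.2.2.1 then (st.1, st.2.1, some p.2, p.1)
          else st
        else st) st =
    ((l.filter (fun p => PySem.Int.mod p.2 2 ≠ 0)).map (fun p => (p.2, p.1))).foldl pvAStep st := by
  induction l generalizing st with
  | nil => rfl
  | cons p l ih =>
      rw [List.foldl_cons, List.filter_cons]
      by_cases h : PySem.Int.mod p.2 2 ≠ 0
      · rw [if_pos h, if_pos (decide_eq_true h),
          List.map_cons, List.foldl_cons, ih]
        rfl
      · rw [if_neg h, if_neg (show ¬(decide (PySem.Int.mod p.2 2 ≠ 0)) = true from fun hc => h (of_decide_eq_true hc)), ih]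

lemma pvFold_nil (ps : List (Int × Int)) :
    ps.foldl pvAStep (none, -1, none, -1) =
      pvTop2 (ps.foldl (fun a q => PySem.List.insertBy (fun a b => decide (a.1 < b.1)) q a) []) :=
  pvFold_insertBy ps []

-- ===== VERDICT (by name: the statement is the Claim_ definition above) =====
theorem second_smallest_odd_index_spec : Claim_equal_second_smallest_odd_index := by
  intro lst _
  unfold Spec_second_smallest_odd_index second_smallest_odd_index second_smallest_odd_index_alt
  simp only [pvFilter_fold, pvFold_nil, PySem.List.sorted_eq_foldl_insertBy]
  generalize (((PySem.List.enumerate lst).filter (fun p => PySem.Int.mod p.2 2 ≠ 0)).map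
      (fun p => (p.2, p.1))).foldl
      (fun a q => PySem.List.insertBy (fun a b => decide (a.1 < b.1)) q a) [] = s
  match s with
  | [] => rfl
  | [(v, i)] => rfl
  | (v, i) :: (w, j) :: t =>
      by_cases hj : j = -1 <;> simp [pvTop2, hj]
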